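-- pv_equiv track=rewrite | github.com/GrafSpiel/GROMARK | k4_bigram_quadgram_analysis.py | expand_key
-- ===== SOURCE A (Python) =====
-- def expand_key(primer, base, length, method="standard"):
--     """Expand a primer to generate a key sequence."""
--     key = list(primer.copy())
--
--     while len(key) < length:
--         if method == "standard":
--             # Standard Gromark: add last two digits
--             next_digit = (key[-1] + key[-2]) % base
--             key.append(next_digit)
--         elif method == "fibonacci":
--             # Sum all digits in the primer
--             next_digit = 0
--             for i in range(1, len(primer) + 1):
--                 if i <= len(key):
--                     next_digit = (next_digit + key[-i]) % base
--             key.append(next_digit)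
--         else:
--             # Default to standard
--             next_digit = (key[-1] + key[-2]) % base
--             key.append(next_digit)
--
--     return key[:length]
-- ===== SOURCE B (Python) =====
-- def expand_key(primer, base, length, method="standard"):
--     """Expand a primer to generate a key sequence (rolling-window re-implementation)."""
--     key = list(primer)
--     need = length - len(key)
--     if need <= 0:
--         return key[:length]
--     if method == "fibonacci":
--         n = len(primer)
--         if n == 0:
--             return [0] * length
--         # rolling sum of the last n digits, updated in O(1) per appended digit
--         s = sum(key) % base
--         idx = 0
--         for _ in range(need):
--             key.append(s)
--             s = (s + key[-1] - key[idx]) % base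
--             idx += 1
--         return key
--     else:
--         a, b = key[-2], key[-1]
--         for _ in range(need):
--             a, b = b, (a + b) % base
--             key.append(b)
--         return key
-- ===== Notes on version B (the rewrite author's own statement) =====
-- stated objective: alternative
-- what changed: B replaces A's per-appended-digit rescan of the last len(primer) digits (the fibonacci method's inner loop) and A's negative re-indexing of the key (standard method) by a single pass maintaining a rolling window sum mod base resp. two registers, one update per appended digit.
import Mathlib
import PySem

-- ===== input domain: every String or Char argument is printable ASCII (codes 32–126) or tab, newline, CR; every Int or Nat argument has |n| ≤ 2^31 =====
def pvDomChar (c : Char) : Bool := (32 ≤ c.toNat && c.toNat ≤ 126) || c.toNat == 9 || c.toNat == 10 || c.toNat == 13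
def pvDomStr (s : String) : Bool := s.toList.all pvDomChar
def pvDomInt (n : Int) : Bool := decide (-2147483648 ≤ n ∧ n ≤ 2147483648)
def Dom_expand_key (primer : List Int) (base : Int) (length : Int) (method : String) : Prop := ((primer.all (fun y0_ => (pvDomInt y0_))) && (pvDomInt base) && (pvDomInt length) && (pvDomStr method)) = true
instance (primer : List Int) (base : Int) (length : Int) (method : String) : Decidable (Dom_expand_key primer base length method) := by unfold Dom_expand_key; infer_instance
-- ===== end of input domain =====

-- B expands the key in a single pass that maintains a rolling window sum mod base
-- (fibonacci method) resp. two registers (standard/default method), instead of A's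
-- re-indexing of the key list per appended digit.

-- ===== PORT A =====
-- the 'fibonacci' branch's inner for-loop over range(1, len(primer)+1)
def pvFibNextA (key : List Int) (primerLen : Nat) (base : Int) : Int :=
  (PySem.List.pyRange 1 ((primerLen : Int) + 1) 1).foldl
    (fun nd i =>
      if i ≤ (key.length : Int) then
        PySem.Int.mod (nd + (PySem.List.pyGet? key (-i)).getD 0) base
      else nd) 0

-- the while-loop of A; fuel = number of remaining appends (guard re-checked each step)
def pvLoopA (base : Int) (length : Int) (method : String) (primerLen : Nat) :
    Nat → List Int → List Int
  | 0, key => key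
  | f + 1, key =>
    if (key.length : Int) < length then
      if method = "standard" then
        pvLoopA base length method primerLen f
          (key ++ [PySem.Int.mod ((PySem.List.pyGet? key (-1)).getD 0 +
                                  (PySem.List.pyGet? key (-2)).getD 0) base])
      else if method = "fibonacci" then
        pvLoopA base length method primerLen f (key ++ [pvFibNextA key primerLen base])
      else
        pvLoopA base length method primerLen f
          (key ++ [PySem.Int.mod ((PySem.List.pyGet? key (-1)).getD 0 +
                                  (PySem.List.pyGet? key (-2)).getD 0) base])
    else key

def expand_key (primer : List Int) (base : Int) (length : Int) (method : String) : List Int :=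
  PySem.List.slice
    (pvLoopA base length method primer.length (length - (primer.length : Int)).toNat primer)
    none (some length)

-- ===== PORT B =====
-- rolling-window loop of Source B's 'fibonacci' branch: s is the running window sum mod base
def pvFibLoopB (base : Int) : Nat → List Int → Int → Int → List Int
  | 0, key, _, _ => key
  | k + 1, key, s, idx =>
    let key' := key ++ [s]
    pvFibLoopB base k key'
      (PySem.Int.mod (s + (PySem.List.pyGet? key' (-1)).getD 0
                        - (PySem.List.pyGet? key' idx).getD 0) base)
      (idx + 1)

-- two-register loop of Source B's standard/default branch
def pvStdLoopB (base : Int) : Nat → List Int → Int → Int → List Int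
  | 0, key, _, _ => key
  | k + 1, key, a, b =>
    let b' := PySem.Int.mod (a + b) base
    pvStdLoopB base k (key ++ [b']) b b'

def expand_key_alt (primer : List Int) (base : Int) (length : Int) (method : String) : List Int :=
  let key := primer
  let need := length - (key.length : Int)
  if need ≤ 0 then PySem.List.slice key none (some length)
  else if method = "fibonacci" then
    if primer.length = 0 then List.replicate length.toNat 0
    else pvFibLoopB base need.toNat key (PySem.Int.mod key.sum base) 0
  else
    pvStdLoopB base need.toNat key
      ((PySem.List.pyGet? key (-2)).getD 0) ((PySem.List.pyGet? key (-1)).getD 0)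

-- ===== PRECONDITION & SPEC =====
-- Pre_ excludes exactly the inputs where A raises: when the key must grow, A needs
-- base ≠ 0 for '% base' (ZeroDivisionError) — except the 'fibonacci' method with an
-- empty primer, whose inner loop never runs — and the standard/default methods need
-- at least two primer digits for key[-2] (IndexError).
def Pre_expand_key (primer : List Int) (base : Int) (length : Int) (method : String) : Prop :=
  length ≤ (primer.length : Int) ∨
  (method = "fibonacci" ∧ (primer = [] ∨ base ≠ 0)) ∨
  (method ≠ "fibonacci" ∧ 2 ≤ primer.length ∧ base ≠ 0)
instance (primer : List Int) (base : Int) (length : Int) (method : String) : Decidable (Pre_expand_key primer base length method) := by unfold Pre_expand_key; infer_instance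

def pvWitness_expand_key : List Int × Int × Int × String := ([7, 6, 4], 10, 12, "standard")

def Spec_expand_key (primer : List Int) (base : Int) (length : Int) (method : String) (out : List Int) : Prop := out = expand_key_alt primer base length method
instance (primer : List Int) (base : Int) (length : Int) (method : String) (out : List Int) : Decidable (Spec_expand_key primer base length method out) := by unfold Spec_expand_key; infer_instance

-- ===== CLAIM (what is proved, stated in full; the proofs are below) =====
def Claim_equal_expand_key : Prop := ∀ (primer : List Int) (base : Int) (length : Int) (method : String), Dom_expand_key primer base length method → Pre_expand_key primer base length method → Spec_expand_key primer base length method (expand_key primer base length method)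

-- ===== LEMMAS AND PROOFS =====

theorem pv_fmod_add_left (a c b : Int) : ((a.fmod b) + c).fmod b = (a + c).fmod b := by
  have h := Int.fmod_add_mul_fdiv a b
  rw [show a + c = (a.fmod b + c) + b * a.fdiv b by omega, Int.add_mul_fmod_self_left]

theorem pv_mod_add_left (a c b : Int) :
    PySem.Int.mod (PySem.Int.mod a b + c) b = PySem.Int.mod (a + c) b := by
  simp only [PySem.Int.mod]; exact pv_fmod_add_left a c b

-- a list of length ≥ 2 ends in two elements
theorem pv_two_tail (l : List Int) (h : 2 ≤ l.length) :
    ∃ p a b, l = p ++ [a, b] := by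
  rcases hr : l.reverse with _ | ⟨b, t⟩
  · have h0 : l.length = 0 := by simpa using congrArg List.length hr
    omega
  · rcases t with _ | ⟨a, p⟩
    · have h0 : l.length = 1 := by simpa using congrArg List.length hr
      omega
    · refine ⟨p.reverse, a, b, ?_⟩
      have : l.reverse.reverse = (b :: a :: p).reverse := congrArg List.reverse hr
      simpa using this

theorem pv_pyGet_pair_neg2 (p : List Int) (a b : Int) :
    PySem.List.pyGet? (p ++ [a, b]) (-2) = some a := by
  rw [PySem.List.pyGet?_neg_ofNat _ 2 (by omega) (by simp)]
  simp

theorem pv_pyGet_pair_neg1 (p : List Int) (a b : Int) :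
    PySem.List.pyGet? (p ++ [a, b]) (-1) = some b := by
  rw [show p ++ [a, b] = (p ++ [a]) ++ [b] by simp]
  exact PySem.List.pyGet?_neg_one_append_singleton _ _

-- a full take-slice is the identity
theorem pv_slice_self (xs : List Int) (n : Int) (h : (xs.length : Int) = n) :
    PySem.List.slice xs none (some n) = xs := by
  rw [PySem.List.slice_to xs (show (0:Int) ≤ n by omega)]
  have : n.toNat = xs.length := by omega
  simp [this]

-- lengths of B's loops
theorem pv_fibLoopB_length (base : Int) :
    ∀ k key s idx, (pvFibLoopB base k key s idx).length = key.length + k := by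
  intro k
  induction k with
  | zero => intro key s idx; simp [pvFibLoopB]
  | succ k ih => intro key s idx; simp [pvFibLoopB, ih]; omega

theorem pv_stdLoopB_length (base : Int) :
    ∀ k key a b, (pvStdLoopB base k key a b).length = key.length + k := by
  intro k
  induction k with
  | zero => intro key a b; simp [pvStdLoopB]
  | succ k ih => intro key a b; simp [pvStdLoopB, ih]; omega

-- A's inner fibonacci fold equals the window sum mod base
theorem pv_fibNextA_eq (key : List Int) (base : Int) :
    ∀ n : Nat, n ≤ key.length →
      pvFibNextA key n base =
        if n = 0 then 0 else PySem.Int.mod ((key.drop (key.length - n)).sum) base := by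
  intro n
  induction n with
  | zero => intro _; simp [pvFibNextA]
  | succ n ih =>
    intro hle
    have hstep : pvFibNextA key (n + 1) base =
        (fun nd (i : Int) =>
          if i ≤ (key.length : Int) then
            PySem.Int.mod (nd + (PySem.List.pyGet? key (-i)).getD 0) base
          else nd) (pvFibNextA key n base) ((n : Int) + 1) := by
      unfold pvFibNextA
      rw [show ((n + 1 : Nat) : Int) + 1 = ((n : Nat) : Int) + 1 + 1 by push_cast; ring,
        PySem.List.pyRange_one_succ_right (by omega), List.foldl_append]
      simp
    have hget : PySem.List.pyGet? key (-(((n + 1 : Nat) : Int))) = key[key.length - (n + 1)]? :=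
      PySem.List.pyGet?_neg_natCast key (n + 1) (by omega) hle
    have hidx : key.length - (n + 1) < key.length := by omega
    have hgetv : (PySem.List.pyGet? key (-((n : Int) + 1))).getD 0 = key[key.length - (n + 1)] := by
      rw [show -((n : Int) + 1) = -(((n + 1 : Nat) : Int)) by push_cast; ring, hget]
      simp [List.getElem?_eq_getElem hidx]
    have hcond : ((n : Int) + 1) ≤ (key.length : Int) := by push_cast at *; omega
    rw [hstep]
    simp only [if_pos hcond, hgetv, ih (by omega)]
    by_cases hn : n = 0
    · subst hn
      have hdrop : key.drop (key.length - 1) = [key[key.length - 1]] := by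
        rw [← List.getElem_cons_drop (as := key) (i := key.length - 1) (h := hidx)]
        simp [show key.length - 1 + 1 = key.length by omega]
      simp [hdrop]
    · have hdrop : key.drop (key.length - (n + 1)) =
          key[key.length - (n + 1)] :: key.drop (key.length - n) := by
        rw [← List.getElem_cons_drop (as := key) (i := key.length - (n + 1)) (h := hidx)]
        simp [show key.length - (n + 1) + 1 = key.length - n by omega]
      simp only [if_neg hn, if_neg (show ¬ n + 1 = 0 by omega), pv_mod_add_left, hdrop,
        List.sum_cons]
      ring_nf

-- A's fibonacci loop with empty primer appends zeros
theorem pv_loopA_fib_empty (base length : Int) (method : String) (hm : method = "fibonacci")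
    (hne : method ≠ "standard") :
    ∀ (f : Nat) (key : List Int), ((key.length : Int) + f = length) →
      pvLoopA base length method 0 f key = key ++ List.replicate f 0 := by
  subst hm
  intro f
  induction f with
  | zero => intro key _; simp [pvLoopA]
  | succ f ih =>
    intro key hlen
    have hlt : ((key.length : Nat) : Int) < length := by push_cast at hlen ⊢; omega
    have hz : pvFibNextA key 0 base = 0 := by
      simp [pvFibNextA]
    simp only [pvLoopA, if_pos hlt, hz]
    rw [if_neg (by decide), ih (key ++ [0]) (by push_cast at hlen ⊢; simp; omega)]
    simp [List.replicate_succ]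

-- A's fibonacci loop equals B's rolling-sum loop
theorem pv_loopA_fib (base length : Int) (method : String) (hm : method = "fibonacci")
    (hne : method ≠ "standard") (n : Nat) (hn : 0 < n) :
    ∀ (f : Nat) (key : List Int) (idx : Nat), idx + n = key.length →
      ((key.length : Int) + f = length) →
      pvLoopA base length method n f key =
        pvFibLoopB base f key (PySem.Int.mod ((key.drop idx).sum) base) (idx : Int) := by
  subst hm
  intro f
  induction f with
  | zero => intro key idx _ _; simp [pvLoopA, pvFibLoopB]
  | succ f ih =>
    intro key idx hidx hlen
    have hlt : ((key.length : Nat) : Int) < length := by push_cast at hlen ⊢; omega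
    have hA : pvFibNextA key n base = PySem.Int.mod ((key.drop idx).sum) base := by
      rw [pv_fibNextA_eq key base n (by omega), if_neg (by omega),
        show key.length - n = idx by omega]
    set s := PySem.Int.mod ((key.drop idx).sum) base with hs
    have hAstep : pvLoopA base length "fibonacci" n (f + 1) key =
        pvLoopA base length "fibonacci" n f (key ++ [s]) := by
      simp only [pvLoopA, if_pos hlt]
      simp [hA]
    have hidx' : idx < key.length := by omega
    have hgl : (PySem.List.pyGet? (key ++ [s]) (-1)).getD 0 = s := by
      rw [PySem.List.pyGet?_neg_one_append_singleton]; rfl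
    have hgi : (PySem.List.pyGet? (key ++ [s]) (idx : Int)).getD 0 = key[idx] := by
      rw [PySem.List.pyGet?_natCast]
      simp [List.getElem?_append_left hidx', List.getElem?_eq_getElem hidx']
    have hBstep : pvFibLoopB base (f + 1) key s (idx : Int) =
        pvFibLoopB base f (key ++ [s])
          (PySem.Int.mod (s + s - key[idx]) base) ((idx : Int) + 1) := by
      simp only [pvFibLoopB, hgl, hgi]
    have hdrop1 : key.drop idx = key[idx] :: key.drop (idx + 1) :=
      (List.getElem_cons_drop (as := key) (i := idx) (h := hidx')).symm
    have hdrop2 : (key ++ [s]).drop (idx + 1) = key.drop (idx + 1) ++ [s] :=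
      List.drop_append_of_le_length (by omega)
    have hsval : PySem.Int.mod (s + s - key[idx]) base =
        PySem.Int.mod (((key ++ [s]).drop (idx + 1)).sum) base := by
      have hST : (key.drop idx).sum = key[idx] + (key.drop (idx + 1)).sum := by
        rw [hdrop1, List.sum_cons]
      rw [hdrop2]
      have h1 : s + s - key[idx] = s + (s - key[idx]) := by ring
      rw [h1, hs, pv_mod_add_left]
      congr 1
      rw [List.sum_append]
      simp only [List.sum_cons, List.sum_nil, add_zero]
      omega
    rw [hAstep, hBstep, hsval, ih (key ++ [s]) (idx + 1) (by simp; omega)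
      (by simp at hlen ⊢; omega)]
    norm_num

-- A's standard/default loop equals B's two-register loop
theorem pv_loopA_std (base length : Int) (method : String) (hm : method ≠ "fibonacci")
    (pl : Nat) :
    ∀ (f : Nat) (p : List Int) (a b : Int), (((p ++ [a, b]).length : Int) + f = length) →
      pvLoopA base length method pl f (p ++ [a, b]) = pvStdLoopB base f (p ++ [a, b]) a b := by
  intro f
  induction f with
  | zero => intro p a b _; simp [pvLoopA, pvStdLoopB]
  | succ f ih =>
    intro p a b hlen
    have hlt : (((p ++ [a, b]).length : Nat) : Int) < length := by
      simp only [List.length_append, List.length_cons, List.length_nil] at hlen ⊢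
      push_cast at hlen ⊢; omega
    have hv1 := pv_pyGet_pair_neg1 p a b
    have hv2 := pv_pyGet_pair_neg2 p a b
    have hstep : ∀ h1 h2 : Bool,
        pvLoopA base length method pl (f + 1) (p ++ [a, b]) =
          pvLoopA base length method pl f
            ((p ++ [a]) ++ [b, PySem.Int.mod (a + b) base]) := by
      intro _ _
      simp only [pvLoopA, if_pos hlt, hv1, hv2, Option.getD_some]
      by_cases hs : method = "standard" <;>
        simp [hs, hm, add_comm b a, List.append_assoc]
    rw [hstep true true]
    have hB : pvStdLoopB base (f + 1) (p ++ [a, b]) a b =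
        pvStdLoopB base f ((p ++ [a]) ++ [b, PySem.Int.mod (a + b) base]) b
          (PySem.Int.mod (a + b) base) := by
      simp [pvStdLoopB, List.append_assoc]
    rw [hB, ih (p ++ [a]) b (PySem.Int.mod (a + b) base) (by
      simp only [List.length_append, List.length_cons, List.length_nil] at hlen ⊢
      push_cast at hlen ⊢; omega)]

-- ===== VERDICT (by name: the statement is the Claim_ definition above) =====
theorem expand_key_spec : Claim_equal_expand_key := by
  intro primer base length method _ hpre
  unfold Spec_expand_key expand_key expand_key_alt
  by_cases hle : length - (primer.length : Int) ≤ 0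
  · rw [if_pos hle, show (length - (primer.length : Int)).toNat = 0 from by omega]
    rfl
  · rw [if_neg hle]
    have hfl : (primer.length : Int) + ((length - (primer.length : Int)).toNat : Int) = length := by
      omega
    by_cases hm : method = "fibonacci"
    · rw [if_pos hm]
      have hne : method ≠ "standard" := by rw [hm]; decide
      by_cases hp : primer.length = 0
      · rw [if_pos hp]
        have hpe : primer = [] := List.length_eq_zero_iff.mp hp
        subst hpe
        simp only [List.length_nil, Nat.cast_zero, sub_zero] at hfl ⊢
        rw [pv_loopA_fib_empty base length method hm hne length.toNat []
          (by simpa using hfl), List.nil_append]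
        rw [pv_slice_self _ length (by simp; omega)]
      · rw [if_neg hp]
        have h := pv_loopA_fib base length method hm hne primer.length (by omega)
          ((length - (primer.length : Int)).toNat) primer 0 (by simp) hfl
        simp only [List.drop_zero, Nat.cast_zero] at h
        rw [h, pv_slice_self _ length (by rw [pv_fibLoopB_length]; push_cast at hfl ⊢; omega)]
    · rw [if_neg hm]
      rcases hpre with h | ⟨hfib, _⟩ | ⟨_, h2, _⟩
      · omega
      · exact absurd hfib hm
      · obtain ⟨p, a, b, hpab⟩ := pv_two_tail primer h2
        subst hpab
        have hstd := pv_loopA_std base length method hm (p ++ [a, b]).length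
          ((length - ((p ++ [a, b]).length : Int)).toNat) p a b hfl
        rw [hstd, pv_pyGet_pair_neg1, pv_pyGet_pair_neg2]
        rw [pv_slice_self _ length (by rw [pv_stdLoopB_length]; push_cast at hfl ⊢; omega)]
        rfl
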